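-- pv_equiv track=rewrite | github.com/UGLimusic/mes_cours_2021 | NSI2/027-CH25-Arborescences/Exercices/scripts/anagrammes.py | f
-- ===== SOURCE A (Python) =====
-- def f(s):
--     r = []
--     for i in range(len(s)):
--         ss = ''
--         for j in range(len(s)):
--             if j != i:
--                 ss += s[j]
--         r.append((ss, s[i]))
--     return r
-- ===== SOURCE B (Python) =====
-- def f(s):
--     return [(s[:i] + s[i+1:], s[i]) for i in range(len(s))]
-- ===== Notes on version B (the rewrite author's own statement) =====
-- stated objective: simpler
-- what changed: The inner character-by-character skip loop (with its j != i guard) is replaced by prefix+suffix slice concatenation in a single comprehension over i.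
import Mathlib
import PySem

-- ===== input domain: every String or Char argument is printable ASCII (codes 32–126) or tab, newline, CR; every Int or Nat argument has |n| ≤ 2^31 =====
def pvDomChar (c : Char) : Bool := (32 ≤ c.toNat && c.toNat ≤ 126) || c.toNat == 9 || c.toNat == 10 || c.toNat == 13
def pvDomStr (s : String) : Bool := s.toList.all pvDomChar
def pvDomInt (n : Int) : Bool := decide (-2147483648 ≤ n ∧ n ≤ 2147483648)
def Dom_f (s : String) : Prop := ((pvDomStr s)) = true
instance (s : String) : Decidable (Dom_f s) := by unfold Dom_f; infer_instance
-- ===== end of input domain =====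

-- B replaces A's inner character-skipping loop by prefix+suffix slice concatenation (simpler, one pass per index).

-- ===== PORT A =====
-- r = []; for i in range(len(s)): ss = ''; for j in range(len(s)): if j != i: ss += s[j]; r.append((ss, s[i]))
def f (s : String) : List (String × String) :=
  (PySem.List.pyRange 0 s.toList.length 1).foldl (fun r i =>
    let ss : List Char :=
      (PySem.List.pyRange 0 s.toList.length 1).foldl (fun ss j =>
        if j ≠ i then ss ++ [PySem.List.pyGetD s.toList j ' '] else ss) []
    r ++ [(String.ofList ss, String.ofList [PySem.List.pyGetD s.toList i ' '])]) []

-- ===== PORT B =====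
-- [(s[:i] + s[i+1:], s[i]) for i in range(len(s))]
def f_alt (s : String) : List (String × String) :=
  (PySem.List.pyRange 0 s.toList.length 1).map (fun i =>
    (String.ofList (PySem.List.slice s.toList none (some i) ++ PySem.List.slice s.toList (some (i + 1)) none),
     String.ofList [PySem.List.pyGetD s.toList i ' ']))

-- ===== PRECONDITION & SPEC =====
def Spec_f (s : String) (out : List (String × String)) : Prop := out = f_alt s
instance (s : String) (out : List (String × String)) : Decidable (Spec_f s out) := by unfold Spec_f; infer_instance

-- ===== CLAIM (what is proved, stated in full; the proofs are below) =====
def Claim_equal_f : Prop := ∀ (s : String), Dom_f s → Spec_f s (f s)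

-- ===== LEMMAS AND PROOFS =====

lemma map_getD_range_eq' (cs : List Char) :
    (List.range cs.length).map (fun j => cs.getD j ' ') = cs := by
  induction cs with
  | nil => simp
  | cons c cs ih =>
    rw [List.length_cons, List.range_succ_eq_map]
    simp only [List.map_cons, List.map_map, List.getD_cons_zero]
    simpa [Function.comp] using ih

-- A's inner skip-loop, as a filtered map over range, equals B's take/drop concatenation.
lemma inner_eq (cs : List Char) (i : Nat) (h : i < cs.length) :
    ((List.range cs.length).filter (fun j => j ≠ i)).map (fun j => cs.getD j ' ')
      = cs.take i ++ cs.drop (i + 1) := by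
  induction cs generalizing i with
  | nil => simp at h
  | cons c cs ih =>
    rw [List.length_cons, List.range_succ_eq_map, List.filter_cons, List.filter_map]
    cases i with
    | zero =>
      rw [if_neg (by simp)]
      have h1 : (List.range cs.length).filter ((fun j => decide (j ≠ 0)) ∘ (· + 1))
          = List.range cs.length := by
        apply List.filter_eq_self.2; intro a _; simp
      rw [h1, List.map_map]
      have h2 : ((fun j => (c :: cs).getD j ' ') ∘ (· + 1)) = (fun j => cs.getD j ' ') := by
        funext j; simp
      rw [h2, map_getD_range_eq' cs]
      simp
    | succ k =>
      rw [if_pos (by simp)]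
      have h1 : (List.range cs.length).filter ((fun j => decide (j ≠ k + 1)) ∘ (· + 1))
          = (List.range cs.length).filter (fun j => j ≠ k) := by
        apply List.filter_congr; intro a _; simp
      rw [h1, List.map_cons, List.map_map]
      have h2 : ((fun j => (c :: cs).getD j ' ') ∘ (· + 1)) = (fun j => cs.getD j ' ') := by
        funext j; simp
      rw [h2, List.getD_cons_zero, ih k (by simpa using h)]
      simp

-- ===== VERDICT (by name: the statement is the Claim_ definition above) =====
theorem f_spec : Claim_equal_f := by
  intro s _
  show f s = f_alt s
  unfold f f_alt
  generalize s.toList = cs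
  rw [PySem.List.pyRange_zero_natCast]
  rw [List.foldl_map, List.map_map]
  rw [PySem.List.foldl_append_singleton_eq_map, List.nil_append]
  apply List.map_congr_left
  intro i hi
  have hilt : i < cs.length := List.mem_range.mp hi
  simp only [Function.comp]
  rw [List.foldl_map]
  have hfun : (fun (ss : List Char) (j : Nat) =>
        if (j : Int) ≠ (i : Int) then ss ++ [PySem.List.pyGetD cs (j : Int) ' '] else ss)
      = (fun ss j => if decide (j ≠ i) = true then ss ++ [cs.getD j ' '] else ss) := by
    funext ss j
    rw [PySem.List.pyGetD_natCast]
    by_cases hji : j = i <;> simp [hji]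
  rw [hfun, PySem.List.foldl_append_if, List.nil_append, inner_eq cs i hilt]
  have h1 : PySem.List.slice cs none (some (i : Int)) = cs.take i :=
    PySem.List.slice_to_natCast cs i
  have h2 : PySem.List.slice cs (some ((i : Int) + 1)) none = cs.drop (i + 1) := by
    rw [show ((i : Int) + 1) = ((i + 1 : Nat) : Int) by push_cast; ring]
    exact PySem.List.slice_from_natCast cs (i + 1)
  rw [h1, h2]
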